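-- pv_equiv track=rewrite | github.com/Minku-Koo/algorithmic_training | pro_training/week1/mignate.py | solution
-- ===== SOURCE A (Python) =====
-- def solution(size, box):
--     result = 0
--
--     def check(stack):
--         check_ = 0
--         while stack:
--             el = stack.pop()
--             if el==1: continue
--             if stack and el == 2 and stack[-1] == 1:
--                 check_ += 1
--
--         return check_
--
--     # 세로로 뽑아서 스택에 넣고, 하나씩 뽑으면서 카운트
--     for x in range(size):
--         line = []
--         for y in range(size):
--             el = box[y][x]
--             if el!=0: line.append(el)
--         result += check(line)
--
--     return result
-- ===== SOURCE B (Python) =====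
-- def solution(size, box):
--     result = 0
--     prev = [0] * size
--     for y in range(size):
--         row = box[y]
--         for x in range(size):
--             el = row[x]
--             if el != 0:
--                 if el == 2 and prev[x] == 1:
--                     result += 1
--                 prev[x] = el
--     return result
-- ===== Notes on version B (the rewrite author's own statement) =====
-- stated objective: simpler
-- what changed: Replaced the per-column compaction lists and the stack-popping helper check() by one row-major pass that keeps, per column, the last non-zero value seen and counts a hit whenever a 2 appears with that value equal to 1.
import Mathlib
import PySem

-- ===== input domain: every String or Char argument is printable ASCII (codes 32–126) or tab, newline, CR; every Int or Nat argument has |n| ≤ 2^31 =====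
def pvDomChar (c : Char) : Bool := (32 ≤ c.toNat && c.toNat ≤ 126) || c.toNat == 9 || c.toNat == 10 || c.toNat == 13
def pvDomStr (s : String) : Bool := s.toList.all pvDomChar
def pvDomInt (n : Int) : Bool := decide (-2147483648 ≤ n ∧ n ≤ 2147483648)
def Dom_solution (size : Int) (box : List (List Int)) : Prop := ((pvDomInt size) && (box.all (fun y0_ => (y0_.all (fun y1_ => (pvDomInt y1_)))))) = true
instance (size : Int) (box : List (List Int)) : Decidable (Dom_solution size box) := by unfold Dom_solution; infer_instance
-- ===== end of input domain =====

-- B replaces A's per-column compaction lists and stack-popping helper by one row-major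
-- pass keeping, per column, the last non-zero value seen (objective: simpler).

-- ===== PORT A =====
-- Python's check() pops from the END of the list; we model the stack with its top at the
-- HEAD (checkLoop receives line.reverse below), so pop = uncons and stack[-1] = head — exact.
def checkLoop : List Int → Int → Int
  | [], check_ => check_
  | el :: rest, check_ =>
    if el = 1 then checkLoop rest check_
    else if rest ≠ [] ∧ el = 2 ∧ rest.headI = 1 then checkLoop rest (check_ + 1)
    else checkLoop rest check_

def solution (size : Int) (box : List (List Int)) : Int :=
  (PySem.List.pyRange 0 size 1).foldl (fun result x =>
    let line := (PySem.List.pyRange 0 size 1).foldl (fun line y =>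
      let el := PySem.List.pyGetD (PySem.List.pyGetD box y []) x 0
      if el ≠ 0 then line ++ [el] else line) ([] : List Int)
    result + checkLoop line.reverse 0) 0

-- ===== PORT B =====
-- prev[x] = el with 0 ≤ x < len(prev) is PySem.List.pySetD (exact there); [0]*size for a
-- negative size is the empty list, matching List.replicate size.toNat 0 — exact.
def solution_alt (size : Int) (box : List (List Int)) : Int :=
  ((PySem.List.pyRange 0 size 1).foldl (fun (s : Int × List Int) y =>
      let row := PySem.List.pyGetD box y []
      (PySem.List.pyRange 0 size 1).foldl (fun (s : Int × List Int) x =>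
        let el := PySem.List.pyGetD row x 0
        if el ≠ 0 then
          ((if el = 2 ∧ PySem.List.pyGetD s.2 x 0 = 1 then s.1 + 1 else s.1),
           PySem.List.pySetD s.2 x el)
        else s) s)
    ((0 : Int), List.replicate size.toNat (0 : Int))).1

-- ===== PRECONDITION & SPEC =====
-- Pre_ excludes exactly the inputs where Python A raises IndexError: A reads box[y][x]
-- for all 0 ≤ y, x < size, so the first size rows must exist and have length ≥ size.
def Pre_solution (size : Int) (box : List (List Int)) : Prop :=
  size ≤ (box.length : Int) ∧ ∀ row ∈ box.take size.toNat, size ≤ (row.length : Int)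
instance (size : Int) (box : List (List Int)) : Decidable (Pre_solution size box) := by
  unfold Pre_solution; infer_instance

def pvWitness_solution : Int × List (List Int) := (2, [[1, 0], [2, 1]])

def Spec_solution (size : Int) (box : List (List Int)) (out : Int) : Prop := out = solution_alt size box
instance (size : Int) (box : List (List Int)) (out : Int) : Decidable (Spec_solution size box out) := by unfold Spec_solution; infer_instance

-- ===== CLAIM (what is proved, stated in full; the proofs are below) =====
def Claim_equal_solution : Prop := ∀ (size : Int) (box : List (List Int)), Dom_solution size box → Pre_solution size box → Spec_solution size box (solution size box)

-- ===== LEMMAS AND PROOFS =====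

-- the cell read both ports perform (total pyGetD form), at natural coordinates
def gcell (box : List (List Int)) (y x : ℕ) : Int :=
  PySem.List.pyGetD (PySem.List.pyGetD box (↑y) []) (↑x) 0

-- column x over the rows listed in ys, zeros removed (A's compacted "line")
def colc (box : List (List Int)) (ys : List ℕ) (x : ℕ) : List Int :=
  (ys.filter (fun y => decide (gcell box y x ≠ 0))).map (fun y => gcell box y x)

-- number of adjacent (1 then 2) pairs, read front to back
def pairs : List Int → Int
  | a :: b :: t => (if a = 1 ∧ b = 2 then 1 else 0) + pairs (b :: t)
  | _ => 0

-- the same count as checkLoop sees it: adjacent (2 then 1) pairs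
def rpairs : List Int → Int
  | a :: b :: t => (if a = 2 ∧ b = 1 then 1 else 0) + rpairs (b :: t)
  | _ => 0

def lastD (l : List Int) : Int := l.getLast?.getD 0

def indf (box : List (List Int)) (y x : ℕ) (prev : List Int) : Int :=
  if gcell box y x = 2 ∧ prev.getD x 0 = 1 then 1 else 0

def resOf (box : List (List Int)) (n : ℕ) (ys : List ℕ) : Int :=
  ((List.range n).map (fun x => pairs (colc box ys x))).sum

def prevOf (box : List (List Int)) (n : ℕ) (ys : List ℕ) : List Int :=
  (List.range n).map (fun x => lastD (colc box ys x))

theorem checkLoop_eq (l : List Int) : ∀ c, checkLoop l c = c + rpairs l := by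
  induction l with
  | nil => intro c; simp [checkLoop, rpairs]
  | cons el rest ih =>
    intro c
    simp only [checkLoop]
    split_ifs with h1 h2
    · rw [ih]; subst h1; cases rest <;> simp [rpairs]
    · rw [ih]
      cases rest with
      | nil => exact absurd rfl h2.1
      | cons b t =>
        simp only [List.headI] at h2
        simp [rpairs, h2.2.1, h2.2.2]; ring
    · rw [ih]
      cases rest with
      | nil => simp [rpairs]
      | cons b t =>
        have hn : ¬(el = 2 ∧ b = 1) := fun hc =>
          h2 ⟨List.cons_ne_nil _ _, hc.1, by simp [List.headI, hc.2]⟩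
        simp [rpairs, hn]

theorem rpairs_concat (l : List Int) (a : Int) :
    rpairs (l ++ [a]) = rpairs l + (if l.getLast? = some 2 ∧ a = 1 then 1 else 0) := by
  induction l with
  | nil => simp [rpairs]
  | cons b t ih =>
    cases t with
    | nil => simp [rpairs]
    | cons c t' =>
      simp only [List.cons_append, rpairs, List.getLast?_cons_cons] at *
      rw [ih]; ring

theorem pairs_concat (l : List Int) (a : Int) :
    pairs (l ++ [a]) = pairs l + (if l.getLast? = some 1 ∧ a = 2 then 1 else 0) := by
  induction l with
  | nil => simp [pairs]
  | cons b t ih =>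
    cases t with
    | nil => simp [pairs]
    | cons c t' =>
      simp only [List.cons_append, pairs, List.getLast?_cons_cons] at *
      rw [ih]; ring

theorem rpairs_reverse (l : List Int) : rpairs l.reverse = pairs l := by
  induction l with
  | nil => rfl
  | cons a t ih =>
    rw [List.reverse_cons, rpairs_concat, ih, List.getLast?_reverse]
    cases t with
    | nil => simp [pairs]
    | cons b t' =>
      simp only [List.head?_cons, pairs, Option.some.injEq]
      have h : (b = 2 ∧ a = 1) ↔ (a = 1 ∧ b = 2) := and_comm
      simp only [h]; ring

theorem colc_concat (box : List (List Int)) (ys : List ℕ) (y x : ℕ) :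
    colc box (ys ++ [y]) x
      = colc box ys x ++ (if gcell box y x ≠ 0 then [gcell box y x] else []) := by
  simp only [colc, List.filter_append]
  split_ifs with h <;> simp [h]

theorem pairs_colc_concat (box : List (List Int)) (ys : List ℕ) (y x : ℕ) :
    pairs (colc box (ys ++ [y]) x)
      = pairs (colc box ys x)
        + (if gcell box y x = 2 ∧ lastD (colc box ys x) = 1 then 1 else 0) := by
  rw [colc_concat]
  by_cases h : gcell box y x ≠ 0
  · rw [if_pos h, pairs_concat]
    congr 1
    have hiff : ((colc box ys x).getLast? = some 1 ∧ gcell box y x = 2)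
        ↔ (gcell box y x = 2 ∧ lastD (colc box ys x) = 1) := by
      unfold lastD
      cases (colc box ys x).getLast? <;> simp
      constructor <;> rintro ⟨h1, h2⟩ <;> simp_all
    simp only [hiff]
  · push Not at h
    rw [if_neg (by simpa using h), List.append_nil]
    have hn : ¬(gcell box y x = 2 ∧ lastD (colc box ys x) = 1) := by
      rintro ⟨h1, _⟩; rw [h] at h1; exact absurd h1 (by norm_num)
    rw [if_neg hn, add_zero]

theorem lastD_colc_concat (box : List (List Int)) (ys : List ℕ) (y x : ℕ) :
    lastD (colc box (ys ++ [y]) x)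
      = if gcell box y x ≠ 0 then gcell box y x else lastD (colc box ys x) := by
  rw [colc_concat]
  split_ifs with h
  · simp [lastD]
  · simp

theorem solution_eq_resOf (size : Int) (box : List (List Int)) :
    solution size box = resOf box size.toNat (List.range size.toNat) := by
  have hrange : PySem.List.pyRange 0 size 1 = List.map (fun k => (Nat.cast k : ℤ)) (List.range size.toNat) := by
    rw [PySem.List.pyRange_zero]
  unfold solution
  rw [hrange]
  simp only [List.foldl_map]
  have hline : ∀ x : ℕ,
      (List.range size.toNat).foldl (fun (line : List Int) (y : ℕ) =>
        if PySem.List.pyGetD (PySem.List.pyGetD box (↑y) []) (↑x) 0 ≠ 0 then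
          line ++ [PySem.List.pyGetD (PySem.List.pyGetD box (↑y) []) (↑x) 0] else line)
        ([] : List Int)
      = colc box (List.range size.toNat) x := by
    intro x
    show (List.range size.toNat).foldl (fun (line : List Int) (y : ℕ) =>
        if gcell box y x ≠ 0 then line ++ [gcell box y x] else line) [] = _
    rw [PySem.List.foldl_append_ite (fun y => gcell box y (x : ℕ) ≠ 0)
        (fun y => gcell box y x) (List.range size.toNat) []]
    simp [colc]
  calc (List.range size.toNat).foldl (fun (result : Int) (x : ℕ) =>
        result + checkLoop ((List.range size.toNat).foldl (fun (line : List Int) (y : ℕ) =>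
          if PySem.List.pyGetD (PySem.List.pyGetD box (↑y) []) (↑x) 0 ≠ 0 then
            line ++ [PySem.List.pyGetD (PySem.List.pyGetD box (↑y) []) (↑x) 0] else line)
          ([] : List Int)).reverse 0) 0
      = (List.range size.toNat).foldl (fun (result : Int) (x : ℕ) =>
          result + pairs (colc box (List.range size.toNat) x)) 0 := by
        apply PySem.List.foldl_congr_mem
        intro acc x _
        rw [hline x, checkLoop_eq, rpairs_reverse, zero_add]
    _ = resOf box size.toNat (List.range size.toNat) := by
        rw [PySem.List.foldl_add, zero_add]; rfl

theorem inner_eq (box : List (List Int)) (y : ℕ) (m : ℕ) :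
    ∀ (res : Int) (prev : List Int), m ≤ prev.length →
    (List.range m).foldl (fun (s : Int × List Int) (x : ℕ) =>
        if PySem.List.pyGetD (PySem.List.pyGetD box (↑y) []) (↑x) 0 ≠ 0 then
          ((if PySem.List.pyGetD (PySem.List.pyGetD box (↑y) []) (↑x) 0 = 2
              ∧ PySem.List.pyGetD s.2 (↑x) 0 = 1 then s.1 + 1 else s.1),
           PySem.List.pySetD s.2 (↑x) (PySem.List.pyGetD (PySem.List.pyGetD box (↑y) []) (↑x) 0))
        else s) (res, prev)
    = (res + ((List.range m).map (fun x => indf box y x prev)).sum,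
       prev.mapIdx (fun i v => if i < m ∧ gcell box y i ≠ 0 then gcell box y i else v)) := by
  induction m with
  | zero =>
    intro res prev _
    simp only [List.range_zero, List.foldl_nil, List.map_nil, List.sum_nil, add_zero]
    congr 1
    apply List.ext_getElem (by simp)
    intro i h1 h2
    simp
  | succ m ih =>
    intro res prev hlen
    have hm : m < prev.length := hlen
    rw [List.range_succ, List.foldl_append, ih res prev (le_of_lt hm), List.foldl_cons, List.foldl_nil]
    have hget : PySem.List.pyGetD (prev.mapIdx (fun i v => if i < m ∧ gcell box y i ≠ 0 then gcell box y i else v)) (↑m) 0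
        = prev.getD m 0 := by
      rw [PySem.List.pyGetD_natCast, List.getD_eq_getElem?_getD, List.getD_eq_getElem?_getD,
          List.getElem?_mapIdx, List.getElem?_eq_getElem hm]
      simp
    have hgc : PySem.List.pyGetD (PySem.List.pyGetD box (↑y) []) ((↑m : ℤ)) 0 = gcell box y m := rfl
    by_cases hg : gcell box y m ≠ 0
    · rw [if_pos (show PySem.List.pyGetD (PySem.List.pyGetD box (↑y) []) (↑m) 0 ≠ 0 from hg)]
      refine Prod.ext ?_ ?_
      · simp only [hgc, hget, List.map_append, List.sum_append, List.map_cons,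
          List.map_nil, List.sum_cons, List.sum_nil, add_zero]
        unfold indf
        split_ifs <;> ring
      · simp only [hgc, PySem.List.pySetD_natCast]
        apply List.ext_getElem (by simp)
        intro i h1 h2
        rw [List.getElem_set, List.getElem_mapIdx, List.getElem_mapIdx]
        rcases eq_or_ne m i with rfl | hmi
        · simp [hg]
        · rw [if_neg hmi]
          have hiff : (i < m ∧ gcell box y i ≠ 0) ↔ (i < m + 1 ∧ gcell box y i ≠ 0) := by
            constructor
            · rintro ⟨a, b⟩; exact ⟨by omega, b⟩
            · rintro ⟨a, b⟩; refine ⟨by omega, b⟩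
          rw [if_congr hiff rfl rfl]
    · rw [if_neg (show ¬ PySem.List.pyGetD (PySem.List.pyGetD box (↑y) []) (↑m) 0 ≠ 0 from hg)]
      push Not at hg
      have hz : indf box y m prev = 0 := by
        unfold indf
        rw [if_neg (by rintro ⟨h1, _⟩; rw [hg] at h1; exact absurd h1 (by norm_num))]
      refine Prod.ext ?_ ?_
      · simp only [List.map_append, List.map_cons, List.map_nil,
          List.sum_append, List.sum_cons, List.sum_nil, add_zero, hz]
      · simp only
        apply List.ext_getElem (by simp)
        intro i h1 h2
        rw [List.getElem_mapIdx, List.getElem_mapIdx]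
        have hiff : (i < m ∧ gcell box y i ≠ 0) ↔ (i < m + 1 ∧ gcell box y i ≠ 0) := by
          constructor
          · rintro ⟨a, b⟩; exact ⟨by omega, b⟩
          · rintro ⟨a, b⟩
            refine ⟨?_, b⟩
            rcases Nat.lt_succ_iff_lt_or_eq.1 a with h | rfl
            · exact h
            · exact absurd hg b
        rw [if_congr hiff rfl rfl]

theorem prevOf_getD (box : List (List Int)) (n : ℕ) (ys : List ℕ) (x : ℕ) (hx : x < n) :
    (prevOf box n ys).getD x 0 = lastD (colc box ys x) := by
  unfold prevOf
  rw [PySem.List.getD_map_range _ n x 0 hx]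

theorem outer_eq (box : List (List Int)) (n : ℕ) (ys : List ℕ) :
    ys.foldl (fun (s : Int × List Int) (y : ℕ) =>
      (List.range n).foldl (fun (s : Int × List Int) (x : ℕ) =>
        if PySem.List.pyGetD (PySem.List.pyGetD box (↑y) []) (↑x) 0 ≠ 0 then
          ((if PySem.List.pyGetD (PySem.List.pyGetD box (↑y) []) (↑x) 0 = 2
              ∧ PySem.List.pyGetD s.2 (↑x) 0 = 1 then s.1 + 1 else s.1),
           PySem.List.pySetD s.2 (↑x) (PySem.List.pyGetD (PySem.List.pyGetD box (↑y) []) (↑x) 0))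
        else s) s) ((0 : Int), List.replicate n (0 : Int))
    = (resOf box n ys, prevOf box n ys) := by
  induction ys using List.reverseRecOn with
  | nil =>
    simp only [List.foldl_nil]
    refine Prod.ext ?_ ?_
    · simp [resOf, colc, pairs]
    · simp [prevOf, colc, lastD, List.map_const', List.length_range]
  | append_singleton ys y ih =>
    rw [List.foldl_append, ih, List.foldl_cons, List.foldl_nil]
    have hlen : n ≤ (prevOf box n ys).length := by simp [prevOf]
    rw [inner_eq box y n _ _ hlen]
    refine Prod.ext ?_ ?_
    · show resOf box n ys + _ = resOf box n (ys ++ [y])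
      unfold resOf
      have hcong : ∀ x ∈ List.range n,
          pairs (colc box (ys ++ [y]) x)
            = pairs (colc box ys x) + indf box y x (prevOf box n ys) := by
        intro x hx
        rw [pairs_colc_concat]
        unfold indf
        rw [prevOf_getD box n ys x (List.mem_range.1 hx)]
      rw [List.map_congr_left hcong, PySem.List.sum_map_add_int]
    · show _ = prevOf box n (ys ++ [y])
      apply List.ext_getElem (by simp [prevOf])
      intro i h1 h2
      have hi : i < n := by simpa [prevOf] using h2
      rw [List.getElem_mapIdx]
      unfold prevOf
      rw [List.getElem_map, List.getElem_range, List.getElem_map, List.getElem_range,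
          lastD_colc_concat, if_congr (and_iff_right hi) rfl rfl]

theorem solution_alt_eq_resOf (size : Int) (box : List (List Int)) :
    solution_alt size box = resOf box size.toNat (List.range size.toNat) := by
  have hrange : PySem.List.pyRange 0 size 1
      = List.map (fun k => (Nat.cast k : ℤ)) (List.range size.toNat) := by
    rw [PySem.List.pyRange_zero]
  unfold solution_alt
  rw [hrange]
  simp only [List.foldl_map]
  rw [outer_eq box size.toNat (List.range size.toNat)]

-- ===== VERDICT (by name: the statement is the Claim_ definition above) =====
theorem solution_spec : Claim_equal_solution := by
  intro size box _ _
  unfold Spec_solution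
  rw [solution_eq_resOf, solution_alt_eq_resOf]
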